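-- pv_equiv track=rewrite | github.com/SurakiatP/slm-finetune-auto-config-dem | src/slm_auto_config/node1/classification.py | _find_key
-- ===== SOURCE A (Python) =====
-- from typing import List, Dict, Any, Tuple
--
-- def _find_key(keys: List[str], candidates: set) -> str:
--     """Finds the best matching key from the available dictionary keys."""
--     # 1. Exact match
--     for k in keys:
--         if str(k).lower().strip() in candidates:
--             return k
--     # 2. Substring match
--     for k in keys:
--         k_lower = str(k).lower().strip()
--         if any(cand in k_lower for cand in candidates):
--             return k
--     return None
-- ===== SOURCE B (Python) =====
-- def _find_key(keys, candidates):
--     """Finds the best matching key: single pass, exact match returned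
--     immediately, first substring match kept as a deferred fallback."""
--     fallback = None
--     for k in keys:
--         k_lower = str(k).lower().strip()
--         if k_lower in candidates:
--             return k
--         if fallback is None and any(cand in k_lower for cand in candidates):
--             fallback = k
--     return fallback
-- ===== Notes on version B (the rewrite author's own statement) =====
-- stated objective: alternative
-- what changed: A's two sequential scans (exact pass, then substring pass) are folded into one scan over the keys that normalises each key once, returns an exact match immediately and remembers the first substring match as a deferred fallback returned after the loop.
import Mathlib
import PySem

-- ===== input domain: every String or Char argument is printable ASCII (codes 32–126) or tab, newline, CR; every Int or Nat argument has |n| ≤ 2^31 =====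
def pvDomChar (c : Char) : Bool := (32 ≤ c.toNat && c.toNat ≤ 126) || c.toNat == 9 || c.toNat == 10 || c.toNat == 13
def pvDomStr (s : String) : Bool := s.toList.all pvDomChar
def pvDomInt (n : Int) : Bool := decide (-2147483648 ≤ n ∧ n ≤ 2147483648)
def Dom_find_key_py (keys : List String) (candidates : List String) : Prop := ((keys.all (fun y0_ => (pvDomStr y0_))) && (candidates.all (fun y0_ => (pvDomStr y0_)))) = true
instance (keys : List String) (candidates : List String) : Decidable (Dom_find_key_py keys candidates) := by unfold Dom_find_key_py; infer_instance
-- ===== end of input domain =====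

-- B folds A's two sequential scans into one pass with a deferred substring-match fallback; same cost, different control flow.

-- ===== PORT A =====
-- str(k).lower().strip()
def pvNorm (k : String) : String := PySem.Str.strip (PySem.Str.lower k)

-- first loop of A: exact match
def pvExactScan : List String → List String → Option String
  | [], _ => none
  | k :: rest, cs => if cs.contains (pvNorm k) then some k else pvExactScan rest cs

-- second loop of A: substring match
def pvSubScan : List String → List String → Option String
  | [], _ => none
  | k :: rest, cs =>
    let kLower := pvNorm k
    if cs.any (fun cand => PySem.Str.isIn cand kLower) then some k else pvSubScan rest cs

def find_key_py (keys : List String) (candidates : List String) : Option String :=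
  match pvExactScan keys candidates with
  | some k => some k
  | none => pvSubScan keys candidates

-- ===== PORT B =====
def pvLoopB : List String → List String → Option String → Option String
  | [], _, fallback => fallback
  | k :: rest, cs, fallback =>
    let kLower := pvNorm k
    if cs.contains kLower then some k
    else if fallback.isNone && cs.any (fun cand => PySem.Str.isIn cand kLower) then
      pvLoopB rest cs (some k)
    else pvLoopB rest cs fallback

def find_key_py_alt (keys : List String) (candidates : List String) : Option String :=
  pvLoopB keys candidates none

-- ===== PRECONDITION & SPEC =====
def Spec_find_key_py (keys : List String) (candidates : List String) (out : Option String) : Prop := out = find_key_py_alt keys candidates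
instance (keys : List String) (candidates : List String) (out : Option String) : Decidable (Spec_find_key_py keys candidates out) := by unfold Spec_find_key_py; infer_instance

-- ===== CLAIM (what is proved, stated in full; the proofs are below) =====
def Claim_equal_find_key_py : Prop := ∀ (keys : List String) (candidates : List String), Dom_find_key_py keys candidates → Spec_find_key_py keys candidates (find_key_py keys candidates)

-- ===== LEMMAS AND PROOFS =====
-- The loop of B, started with any fallback, equals: exact match if one exists,
-- else the pending fallback, else the substring scan.
theorem pvLoopB_eq (keys cs : List String) (fb : Option String) :
    pvLoopB keys cs fb =
      match pvExactScan keys cs with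
      | some k => some k
      | none => match fb with
        | some f => some f
        | none => pvSubScan keys cs := by
  induction keys generalizing fb with
  | nil => cases fb <;> simp [pvLoopB, pvExactScan, pvSubScan]
  | cons k rest ih =>
    by_cases hx : pvNorm k ∈ cs
    · simp [pvLoopB, pvExactScan, hx]
    · by_cases hs : ∃ x ∈ cs, PySem.Chars.isIn x.toList (pvNorm k).toList = true
      · cases fb <;> simp [pvLoopB, pvExactScan, pvSubScan, hx, hs, ih]
      · cases fb <;> simp [pvLoopB, pvExactScan, pvSubScan, hx, hs, ih]

-- ===== VERDICT (by name: the statement is the Claim_ definition above) =====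
theorem find_key_py_spec : Claim_equal_find_key_py := by
  intro keys candidates _
  unfold Spec_find_key_py find_key_py find_key_py_alt
  rw [pvLoopB_eq]
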